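-- pv_equiv track=rewrite | github.com/Samach21/datastruct_exercise | ch1-5.py | listTri
-- ===== SOURCE A (Python) =====
-- def listTri(n, sym):
--     ls = []
--     for i in range(1, n + 3):
--         ls.append((n + 2 - i) * '.' + (i * sym))
--     if sym == '+':
--         for i in range(len(ls)):
--             ls[i] = ls[i][::-1]
--         ls.reverse()
--     return ls
-- ===== SOURCE B (Python) =====
-- def listTri(n, sym):
--     rows = []
--     if sym == '+':
--         left, right = '+' * (n + 2), ''
--         for _ in range(n + 2):
--             rows.append(left + right)
--             left = left[:-1]
--             right += '.'
--     else:
--         left, right = '.' * (n + 1), sym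
--         for _ in range(n + 2):
--             rows.append(left + right)
--             left = left[:-1]
--             right += sym
--     return rows
-- ===== Notes on version B (the rewrite author's own statement) =====
-- stated objective: alternative
-- what changed: B replaces A's per-index row formula plus the '+'-case triple post-processing (reverse every string, then reverse the list) by a single stateful accumulator loop: it keeps a left part and a right part as strings, emits left+right each iteration, and derives the next row by chopping one character off left and appending to right; for '+' the accumulator starts in the already-final orientation so no reversal ever happens.
import Mathlib
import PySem

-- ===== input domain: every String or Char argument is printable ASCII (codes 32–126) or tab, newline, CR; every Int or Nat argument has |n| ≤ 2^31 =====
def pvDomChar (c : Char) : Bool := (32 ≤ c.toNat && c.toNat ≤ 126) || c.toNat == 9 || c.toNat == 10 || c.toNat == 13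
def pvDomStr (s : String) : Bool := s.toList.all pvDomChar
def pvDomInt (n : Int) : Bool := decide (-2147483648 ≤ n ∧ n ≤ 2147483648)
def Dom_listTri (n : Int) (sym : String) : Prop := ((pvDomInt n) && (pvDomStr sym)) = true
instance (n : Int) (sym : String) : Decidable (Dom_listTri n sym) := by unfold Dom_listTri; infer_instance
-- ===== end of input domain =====

-- B replaces A's per-row index arithmetic plus build-then-reverse-strings-then-reverse-list post-processing by one
-- stateful accumulator loop that derives each row from the previous one by string surgery (alternative decomposition).

-- ===== PORT A =====
-- step-for-step: the append loop over range(1, n+3), then (if sym == '+') reverse every string and reverse the list.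
-- s[::-1] is exact String reversal, written here as String.ofList s.toList.reverse.
def listTri (n : Int) (sym : String) : List String :=
  let ls := (PySem.List.pyRange 1 (n + 3) 1).foldl
    (fun ls i => ls ++ [String.ofList (PySem.List.pyRepeat ['.'] (n + 2 - i) ++ PySem.List.pyRepeat sym.toList i)]) []
  if sym = "+" then
    (ls.map (fun s => String.ofList s.toList.reverse)).reverse
  else ls

-- ===== PORT B =====
-- Source B step for step: state (rows, left, right); 'left = left[:-1]' = drop the last char (List.dropLast, exact for s[:-1]);
-- 'right += …' = append; the loop counter of 'for _ in range(n+2)' is ignored.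
def listTri_alt (n : Int) (sym : String) : List String :=
  if sym = "+" then
    ((PySem.List.pyRange 0 (n + 2) 1).foldl
      (fun (st : List String × List Char × List Char) _ =>
        (st.1 ++ [String.ofList (st.2.1 ++ st.2.2)], st.2.1.dropLast, st.2.2 ++ ['.']))
      ([], PySem.List.pyRepeat ['+'] (n + 2), [])).1
  else
    ((PySem.List.pyRange 0 (n + 2) 1).foldl
      (fun (st : List String × List Char × List Char) _ =>
        (st.1 ++ [String.ofList (st.2.1 ++ st.2.2)], st.2.1.dropLast, st.2.2 ++ sym.toList))
      ([], PySem.List.pyRepeat ['.'] (n + 1), sym.toList)).1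

-- ===== PRECONDITION & SPEC =====
def Spec_listTri (n : Int) (sym : String) (out : List String) : Prop := out = listTri_alt n sym
instance (n : Int) (sym : String) (out : List String) : Decidable (Spec_listTri n sym out) := by unfold Spec_listTri; infer_instance

-- ===== CLAIM (what is proved, stated in full; the proofs are below) =====
def Claim_equal_listTri : Prop := ∀ (n : Int) (sym : String), Dom_listTri n sym → Spec_listTri n sym (listTri n sym)

-- ===== LEMMAS AND PROOFS =====
theorem pyRepeat_eq_flatten (t : List Char) (m : Int) :
    PySem.List.pyRepeat t m = (List.replicate m.toNat t).flatten := by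
  simp [PySem.List.pyRepeat]

theorem flatten_replicate_singleton {α : Type} (j : Nat) (a : α) :
    (List.replicate j [a]).flatten = List.replicate j a := by
  induction j with
  | zero => simp
  | succ k ih => simp [List.replicate_succ, ih]

theorem foldl_append_singleton_eq_map {α β : Type} (f : α → β) (l : List α) (acc : List β) :
    l.foldl (fun a i => a ++ [f i]) acc = acc ++ l.map f := by
  induction l generalizing acc with
  | nil => simp
  | cons x xs ih => simp [List.foldl, ih]

-- characterisation of B's accumulator loop (the loop ignores the range element)
theorem loopB (t : List Char) (c : Char) (l : List Int) :
    ∀ (acc : List String) (m : Nat) (r : List Char),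
    (l.foldl
      (fun (st : List String × List Char × List Char) _ =>
        (st.1 ++ [String.ofList (st.2.1 ++ st.2.2)], st.2.1.dropLast, st.2.2 ++ t))
      (acc, List.replicate m c, r)).1
    = acc ++ (List.range l.length).map
        (fun j => String.ofList (List.replicate (m - j) c ++ (r ++ (List.replicate j t).flatten))) := by
  induction l with
  | nil => intro acc m r; simp
  | cons x xs ih =>
    intro acc m r
    have hdl : (List.replicate m c).dropLast = List.replicate (m - 1) c := by
      cases m with
      | zero => simp
      | succ k => simp [List.replicate_succ']
    simp only [List.foldl_cons, hdl]
    rw [ih]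
    simp only [List.length_cons, List.range_succ_eq_map, List.map_cons, List.map_map,
      List.append_assoc, List.singleton_append]
    congr 1
    congr 1
    · simp
    apply List.map_congr_left
    intro j _
    simp only [Function.comp]
    have hm : m - 1 - j = m - (j + 1) := by omega
    rw [hm, List.replicate_succ]
    simp

theorem listTri_spec' (n : Int) (sym : String) : listTri n sym = listTri_alt n sym := by
  unfold listTri listTri_alt
  rw [foldl_append_singleton_eq_map]
  simp only [List.nil_append]
  by_cases h : sym = "+"
  · simp only [h, reduceIte]
    rw [pyRepeat_eq_flatten ['+'] (n + 2), flatten_replicate_singleton, loopB]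
    apply List.ext_getElem
    · simp only [List.length_reverse, List.length_map, List.length_range, List.nil_append,
        PySem.List.length_pyRange_one]
      omega
    · intro i h1 h2
      simp only [List.length_reverse, List.length_map, List.length_range, List.nil_append,
        PySem.List.length_pyRange_one] at h1 h2
      rw [List.getElem_reverse]
      simp only [List.getElem_map, List.getElem_range, List.nil_append, List.length_map,
        PySem.List.getElem_pyRange_one, PySem.List.length_pyRange_one]
      rw [pyRepeat_eq_flatten, flatten_replicate_singleton]
      have hsym : ("+" : String).toList = ['+'] := by decide
      rw [hsym, pyRepeat_eq_flatten ['+'], flatten_replicate_singleton,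
        flatten_replicate_singleton]
      simp only [String.toList_ofList, List.reverse_append, List.reverse_replicate]
      have e1 : ((1 : Int) + ((n + 3 - 1).toNat - 1 - i : Nat)).toNat = (n + 2).toNat - i := by
        omega
      have e2 : (n + 2 - ((1 : Int) + ((n + 3 - 1).toNat - 1 - i : Nat))).toNat = i := by
        omega
      rw [e1, e2]
  · simp only [if_neg h]
    rw [pyRepeat_eq_flatten ['.'] (n + 1), flatten_replicate_singleton, loopB]
    simp only [List.nil_append]
    apply List.ext_getElem
    · simp only [List.length_map, List.length_range, PySem.List.length_pyRange_one]
      omega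
    · intro i h1 h2
      simp only [List.length_map, List.length_range, PySem.List.length_pyRange_one] at h1 h2
      simp only [List.getElem_map, List.getElem_range, PySem.List.getElem_pyRange_one]
      rw [pyRepeat_eq_flatten ['.'], flatten_replicate_singleton, pyRepeat_eq_flatten]
      have e1 : (n + 2 - (1 + (i : Int))).toNat = (n + 1).toNat - i := by omega
      have e2 : (1 + (i : Int)).toNat = i + 1 := by omega
      rw [e1, e2, List.replicate_succ]
      simp

-- ===== VERDICT (by name: the statement is the Claim_ definition above) =====
theorem listTri_spec : Claim_equal_listTri := by
  intro n sym _
  unfold Spec_listTri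
  exact listTri_spec' n sym
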